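/- GENERATED by mk_final_copies.py from the proof of the farm's unit `vorbis_decode_packet_rest.14` (farm:vorbis_decode_packet_rest.14.2: Proof.lean) as the
   re-elaboration sweep compiled it — do not edit. -/
import Asan.CheckWalk
import Vorbis.Spec.PacketRestFrame
import Vorbis.Spec.Units.vorbis_decode_packet_rest_14
import Vorbis.Spec.Worked.vorbis_decode_packet_rest_14_Lemmas

/-!
  THE PROOF OF THE UNIT `vorbis_decode_packet_rest.14` (segment .14 of `vorbis_decode_packet_rest`, 0x1119bc → 0x111a3e:
  the `current_loc` bookkeeping and the store of `*len`, C lines 3441–3473).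

  The whole segment is walked in Lemmas.lean (`seg14_of_off`: all paths, 14 check sites) under the one fact
  `entry rsp + 24 ≤ len`: `*len` lies above the two incoming stack-argument slots (`right_end`, `p_left`), which the
  short-final-frame path reads in place at 0x111c0d AFTER its stores to `*len`. Since contracts version 2 that fact is the
  clause `Args.len_above` of the function's precondition, which the entry assertion carries as `Frame.pre`.
-/

open X86 X86.User Asan Vorbis Vorbis.Spec Vorbis.Spec.vorbis_decode_packet_rest

namespace Vorbis.Spec.vorbis_decode_packet_rest_14

/-- **`len` lies above the stack-argument slots** at every state that satisfies the entry assertion of the segment: the clause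
`Args.len_above` of the precondition of `vorbis_decode_packet_rest`, read out of the carried `Frame.pre`
(`pre = ShadowPre ∧ DecodeInv ∧ Args`). -/
theorem seg14_len_above {u₀ : State} {others : List Obj} {frames : List (Nat × FrameLayout)} {len : Nat} {Ar : Arena}
    {stored room : Int} {mode : Nat} {ysz : Nat → Nat} {u : State} {ret : Word} {left' : Int} {v : State}
    (hat : At14Core u₀ others frames len Ar stored room mode ysz u ret left' v) :
    (u.reg .rsp).toNat + 24 ≤ lenOf u := by
  -- the function's precondition, carried by the frame assertion
  obtain ⟨_hsh, _hinv0, hargs⟩ := hat.toStable.toFrame.pre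
  exact hargs.len_above

end Vorbis.Spec.vorbis_decode_packet_rest_14

/-- Segment 14 of `vorbis_decode_packet_rest` (0x1119bc … 0x111a3e, C lines 3441–3473) takes its entry assertion `At14` to the
exit assertion `At15`: `statement_of_off` (the walk of every path, Lemmas.lean) with `Args.len_above` for its hypothesis. -/
theorem Vorbis.Spec.Worked.vorbis_decode_packet_rest_14_ok : Vorbis.Spec.vorbis_decode_packet_rest_14.Statement := by
  apply Vorbis.Spec.vorbis_decode_packet_rest_14.statement_of_off
  intro u₀ others frames len Ar stored room mode ysz u ret left' v hat
  exact Vorbis.Spec.vorbis_decode_packet_rest_14.seg14_len_above hat
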